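-- pv_equiv track=rewrite | github.com/jguida941/voiceterm | dev/scripts/devctl/text_utils.py | normalize_inline_markdown
-- ===== SOURCE A (Python) =====
-- def normalize_inline_markdown(value: str) -> str:
--     """Strip common inline markdown wrappers from a short text fragment."""
--     normalized = value.strip()
--     wrappers = ("**", "__", "`")
--     changed = True
--     while normalized and changed:
--         changed = False
--         for wrapper in wrappers:
--             if normalized.startswith(wrapper) and normalized.endswith(wrapper):
--                 normalized = normalized[len(wrapper) : -len(wrapper)].strip()
--                 changed = True
--                 break
--     return normalized
-- ===== SOURCE B (Python) =====
-- def normalize_inline_markdown(value: str) -> str: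
--     """Strip common inline markdown wrappers using two index pointers into the
--     original string (no intermediate slice/strip allocations until the end)."""
--     s = value
--     lo, hi = 0, len(s)
--     while True:
--         while lo < hi and s[lo].isspace():
--             lo += 1
--         while lo < hi and s[hi - 1].isspace():
--             hi -= 1
--         if lo >= hi:
--             return ""
--         c = s[lo]
--         if c == s[hi - 1] and c == "`":
--             lo += 1
--             hi -= 1
--         elif (c == s[hi - 1] and c in "*_" and hi - lo >= 2
--               and s[lo + 1] == c and s[hi - 2] == c):
--             lo += 2
--             hi -= 2
--         else:
--             return s[lo:hi]
-- ===== Notes on version B (the rewrite author's own statement) =====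
-- stated objective: alternative
-- what changed: Replaces A's repeated strip/startswith/endswith/slice passes that allocate a new string per peeled wrapper with a two-pointer scan that moves lo/hi indices over the original string and slices once at the end.
import Mathlib
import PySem

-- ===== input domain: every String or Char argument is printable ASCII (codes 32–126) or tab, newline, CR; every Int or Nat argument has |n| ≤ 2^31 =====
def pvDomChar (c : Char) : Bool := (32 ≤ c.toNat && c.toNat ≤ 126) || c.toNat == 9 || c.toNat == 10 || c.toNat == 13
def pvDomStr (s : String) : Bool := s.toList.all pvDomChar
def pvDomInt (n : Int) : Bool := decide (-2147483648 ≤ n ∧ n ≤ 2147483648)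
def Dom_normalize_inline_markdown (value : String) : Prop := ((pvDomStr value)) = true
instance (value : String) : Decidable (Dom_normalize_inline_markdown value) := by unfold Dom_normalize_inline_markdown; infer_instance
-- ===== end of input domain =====

-- B is an index-based two-pointer rewrite of A's strip/slice loop; equal return value on all inputs (alternative decomposition, no asymptotic claim).

-- ===== PORT A =====
-- termination helper for A's while loop (each matched wrapper strictly shortens the string)
theorem pvStripLenLe (s : List Char) : (PySem.Chars.strip s).length ≤ s.length := by
  simp only [PySem.Chars.strip, PySem.Chars.rstrip, PySem.Chars.lstrip]
  calc ((List.dropWhile PySem.Chars.isspace (List.dropWhile PySem.Chars.isspace s).reverse).reverse).length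
      ≤ ((List.dropWhile PySem.Chars.isspace s).reverse).length := by
        rw [List.length_reverse]; exact (List.length_dropWhile_le _ _).trans (by simp)
    _ ≤ s.length := by simpa using List.length_dropWhile_le _ s

theorem pvSliceLenLt {s : List Char} (a : Int) (b : Int) (ha : 1 ≤ a) (h : s ≠ []) :
    (PySem.List.slice s (some a) (some b)).length < s.length := by
  have hlen : 0 < s.length := List.length_pos_iff.mpr h
  rw [PySem.List.length_slice]
  have hb := PySem.List.clampIdx_le s.length b
  have : 1 ≤ PySem.List.clampIdx s.length a := by
    simp only [PySem.List.clampIdx]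
    split <;> omega
  omega

-- A's while loop, transliterated: one peel per iteration, first wrapper wins
def nimLoopA (n : List Char) : List Char :=
  if n.isEmpty then n
  else if PySem.Chars.startswith n ['*','*'] && PySem.Chars.endswith n ['*','*'] then
    nimLoopA (PySem.Chars.strip (PySem.List.slice n (some 2) (some (-2))))
  else if PySem.Chars.startswith n ['_','_'] && PySem.Chars.endswith n ['_','_'] then
    nimLoopA (PySem.Chars.strip (PySem.List.slice n (some 2) (some (-2))))
  else if PySem.Chars.startswith n ['`'] && PySem.Chars.endswith n ['`'] then
    nimLoopA (PySem.Chars.strip (PySem.List.slice n (some 1) (some (-1))))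
  else n
termination_by n.length
decreasing_by
  all_goals
    have hne : ¬ (n.isEmpty = true) := by assumption
    exact lt_of_le_of_lt (pvStripLenLe _)
      (pvSliceLenLt _ _ (by norm_num) (by simpa [List.isEmpty_iff] using hne))

def normalize_inline_markdown (value : String) : String :=
  String.ofList (nimLoopA (PySem.Chars.strip value.toList))

-- ===== PORT B =====
-- inner while loops of Source B: move lo forward / hi backward past whitespace
def skipL (cs : List Char) (lo hi : Nat) : Nat :=
  if lo < hi ∧ PySem.Chars.isspace (cs.getD lo ' ') then skipL cs (lo + 1) hi else lo
termination_by hi - lo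
decreasing_by omega

def skipR (cs : List Char) (lo hi : Nat) : Nat :=
  if lo < hi ∧ PySem.Chars.isspace (cs.getD (hi - 1) ' ') then skipR cs lo (hi - 1) else hi
termination_by hi - lo
decreasing_by omega

theorem skipL_ge (cs : List Char) (lo hi : Nat) : lo ≤ skipL cs lo hi := by
  rw [skipL]
  split
  · exact le_trans (by omega) (skipL_ge cs (lo + 1) hi)
  · exact le_refl lo
termination_by hi - lo
decreasing_by rename_i h; omega

theorem skipR_le (cs : List Char) (lo hi : Nat) : skipR cs lo hi ≤ hi := by
  rw [skipR]
  split
  · exact le_trans (skipR_le cs lo (hi - 1)) (by omega)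
  · exact le_refl hi
termination_by hi - lo
decreasing_by rename_i h; omega

-- outer loop of Source B over the two pointers
def loopB (cs : List Char) (lo hi : Nat) : String :=
  let lo' := skipL cs lo hi
  let hi' := skipR cs lo' hi
  if hi' ≤ lo' then ""
  else
    let c := cs.getD lo' ' '
    if c = cs.getD (hi' - 1) ' ' ∧ c = '`' then
      loopB cs (lo' + 1) (hi' - 1)
    else if c = cs.getD (hi' - 1) ' ' ∧ (c = '*' ∨ c = '_') ∧ 2 ≤ hi' - lo' ∧
            cs.getD (lo' + 1) ' ' = c ∧ cs.getD (hi' - 2) ' ' = c then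
      loopB cs (lo' + 2) (hi' - 2)
    else
      String.ofList ((cs.drop lo').take (hi' - lo'))
termination_by hi - lo
decreasing_by
  all_goals
    have hlt : skipL cs lo hi < skipR cs (skipL cs lo hi) hi :=
      Nat.lt_of_not_le (by assumption)
    have h1 := skipL_ge cs lo hi
    have h2 := skipR_le cs (skipL cs lo hi) hi
    omega

def normalize_inline_markdown_alt (value : String) : String :=
  loopB value.toList 0 value.toList.length

-- ===== PRECONDITION & SPEC =====
def Spec_normalize_inline_markdown (value : String) (out : String) : Prop := out = normalize_inline_markdown_alt value
instance (value : String) (out : String) : Decidable (Spec_normalize_inline_markdown value out) := by unfold Spec_normalize_inline_markdown; infer_instance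

-- ===== CLAIM (what is proved, stated in full; the proofs are below) =====
def Claim_equal_normalize_inline_markdown : Prop := ∀ (value : String), Dom_normalize_inline_markdown value → Spec_normalize_inline_markdown value (normalize_inline_markdown value)

-- ===== LEMMAS AND PROOFS =====

-- the window cs[lo:hi] as a list
def pvSeg (cs : List Char) (lo hi : Nat) : List Char := (cs.drop lo).take (hi - lo)

theorem pvSegLen (cs : List Char) (lo hi : Nat) (hle : hi ≤ cs.length) :
    (pvSeg cs lo hi).length = hi - lo := by
  simp [pvSeg]; omega

theorem pvSegGet (cs : List Char) (lo hi i : Nat) (hi_le : hi ≤ cs.length) (hil : i < hi - lo) :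
    (pvSeg cs lo hi)[i]? = some (cs.getD (lo + i) ' ') := by
  have hlt : lo + i < cs.length := by omega
  simp [pvSeg, List.getElem?_drop, hil,
        List.getD_eq_getElem?_getD, List.getElem?_eq_getElem hlt]

theorem pvSegCons (cs : List Char) (lo hi : Nat) (hlt : lo < hi) (hle : hi ≤ cs.length) :
    pvSeg cs lo hi = cs.getD lo ' ' :: pvSeg cs (lo + 1) hi := by
  have hlo : lo < cs.length := by omega
  simp only [pvSeg]
  rw [List.drop_eq_getElem_cons hlo, show hi - lo = (hi - (lo + 1)) + 1 by omega,
      List.take_succ_cons]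
  simp [List.getD_eq_getElem?_getD, List.getElem?_eq_getElem hlo]

theorem pvSegSnoc (cs : List Char) (lo hi : Nat) (hlt : lo < hi) (hle : hi ≤ cs.length) :
    pvSeg cs lo hi = pvSeg cs lo (hi - 1) ++ [cs.getD (hi - 1) ' '] := by
  have hlt1 : hi - 1 < cs.length := by omega
  simp only [pvSeg]
  rw [show hi - lo = (hi - 1 - lo) + 1 by omega, List.take_add_one]
  congr 1
  rw [List.getElem?_drop, show lo + (hi - 1 - lo) = hi - 1 by omega,
      List.getElem?_eq_getElem hlt1]
  simp [List.getD_eq_getElem?_getD, List.getElem?_eq_getElem hlt1]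

theorem pvSkipL_le (cs : List Char) (lo hi : Nat) (h : lo ≤ hi) : skipL cs lo hi ≤ hi := by
  rw [skipL]
  split
  · rename_i hg
    exact pvSkipL_le cs (lo + 1) hi (by omega)
  · exact h
termination_by hi - lo
decreasing_by rename_i hg; omega

theorem pvSkipR_ge (cs : List Char) (lo hi : Nat) (h : lo ≤ hi) : lo ≤ skipR cs lo hi := by
  rw [skipR]
  split
  · rename_i hg
    exact pvSkipR_ge cs lo (hi - 1) (by omega)
  · exact h
termination_by hi - lo
decreasing_by rename_i hg; omega

theorem pvLstripSeg (cs : List Char) : ∀ (k lo hi : Nat), hi - lo ≤ k → hi ≤ cs.length →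
    List.dropWhile PySem.Chars.isspace (pvSeg cs lo hi) = pvSeg cs (skipL cs lo hi) hi := by
  intro k
  induction k with
  | zero =>
    intro lo hi hk hle
    have hseg : pvSeg cs lo hi = [] := by simp [pvSeg]; omega
    rw [skipL, if_neg (by omega : ¬ (lo < hi ∧ PySem.Chars.isspace (cs.getD lo ' ') = true)), hseg]
    simp
  | succ k ih =>
    intro lo hi hk hle
    by_cases hlt : lo < hi
    · by_cases hsp : PySem.Chars.isspace (cs.getD lo ' ') = true
      · rw [pvSegCons cs lo hi hlt hle, List.dropWhile_cons_of_pos hsp,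
            skipL, if_pos ⟨hlt, hsp⟩]
        exact ih (lo + 1) hi (by omega) hle
      · rw [pvSegCons cs lo hi hlt hle, List.dropWhile_cons_of_neg hsp,
            skipL, if_neg (by tauto), ← pvSegCons cs lo hi hlt hle]
    · have hseg : pvSeg cs lo hi = [] := by simp [pvSeg]; omega
      rw [skipL, if_neg (by tauto), hseg]
      simp

theorem pvRstripSeg (cs : List Char) : ∀ (k lo hi : Nat), hi - lo ≤ k → hi ≤ cs.length →
    (List.dropWhile PySem.Chars.isspace (pvSeg cs lo hi).reverse).reverse = pvSeg cs lo (skipR cs lo hi) := by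
  intro k
  induction k with
  | zero =>
    intro lo hi hk hle
    have hseg : pvSeg cs lo hi = [] := by simp [pvSeg]; omega
    rw [skipR, if_neg (by omega : ¬ (lo < hi ∧ PySem.Chars.isspace (cs.getD (hi - 1) ' ') = true)), hseg]
    simp
  | succ k ih =>
    intro lo hi hk hle
    by_cases hlt : lo < hi
    · by_cases hsp : PySem.Chars.isspace (cs.getD (hi - 1) ' ') = true
      · rw [pvSegSnoc cs lo hi hlt hle]
        simp only [List.reverse_append, List.reverse_cons, List.reverse_nil, List.nil_append,
          List.cons_append, List.dropWhile_cons_of_pos hsp]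
        rw [skipR, if_pos ⟨hlt, hsp⟩]
        exact ih lo (hi - 1) (by omega) (by omega)
      · rw [skipR, if_neg (by tauto)]
        conv_lhs => rw [pvSegSnoc cs lo hi hlt hle]
        simp only [List.reverse_append, List.reverse_cons, List.reverse_nil, List.nil_append,
          List.cons_append, List.dropWhile_cons_of_neg hsp]
        rw [List.reverse_reverse]
        exact (pvSegSnoc cs lo hi hlt hle).symm
    · have hseg : pvSeg cs lo hi = [] := by simp [pvSeg]; omega
      rw [skipR, if_neg (by tauto), hseg]
      simp

theorem pvStripSeg (cs : List Char) (lo hi : Nat) (hle : hi ≤ cs.length) :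
    PySem.Chars.strip (pvSeg cs lo hi) = pvSeg cs (skipL cs lo hi) (skipR cs (skipL cs lo hi) hi) := by
  simp only [PySem.Chars.strip, PySem.Chars.lstrip, PySem.Chars.rstrip]
  rw [pvLstripSeg cs (hi - lo) lo hi le_rfl hle,
      pvRstripSeg cs (hi - skipL cs lo hi) (skipL cs lo hi) hi le_rfl hle]

-- prefix / suffix characterisations via getElem?
theorem pvPre1 (s : List Char) (w : Char) : ([w] <+: s) ↔ s[0]? = some w := by
  cases s <;> simp [List.cons_prefix_cons, eq_comm]

theorem pvPre2 (s : List Char) (w v : Char) : ([w, v] <+: s) ↔ s[0]? = some w ∧ s[1]? = some v := by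
  rcases s with _ | ⟨x, _ | ⟨y, t⟩⟩
  · simp
  · simp [List.cons_prefix_cons]
  · simp [List.cons_prefix_cons, eq_comm]

theorem pvRev0 (s : List Char) : s.reverse[0]? = s[s.length - 1]? := by
  rcases s with _ | ⟨x, t⟩
  · rfl
  · exact List.getElem?_reverse (by simp)

theorem pvSW1 (s : List Char) (w : Char) :
    PySem.Chars.startswith s [w] = true ↔ s[0]? = some w := by
  rw [PySem.Chars.startswith_iff]; exact pvPre1 s w

theorem pvSW2 (s : List Char) (w : Char) :
    PySem.Chars.startswith s [w, w] = true ↔ s[0]? = some w ∧ s[1]? = some w := by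
  rw [PySem.Chars.startswith_iff]; exact pvPre2 s w w

theorem pvEW1 (s : List Char) (w : Char) :
    PySem.Chars.endswith s [w] = true ↔ s[s.length - 1]? = some w := by
  rw [PySem.Chars.endswith_iff, ← List.reverse_prefix]
  simp only [List.reverse_cons, List.reverse_nil, List.nil_append]
  rw [pvPre1, pvRev0]

theorem pvEW2 (s : List Char) (w : Char) (h2 : 2 ≤ s.length) :
    PySem.Chars.endswith s [w, w] = true ↔ s[s.length - 2]? = some w ∧ s[s.length - 1]? = some w := by
  rw [PySem.Chars.endswith_iff, ← List.reverse_prefix]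
  simp only [List.reverse_cons, List.reverse_nil, List.nil_append, List.cons_append]
  rw [pvPre2, pvRev0, List.getElem?_reverse (by omega : 1 < s.length),
      show s.length - 1 - 1 = s.length - 2 by omega]
  tauto

theorem pvPeel1 (cs : List Char) (m h : Nat) (hmh : m < h) (hle : h ≤ cs.length) :
    PySem.List.slice (pvSeg cs m h) (some 1) (some (-1)) = pvSeg cs (m + 1) (h - 1) := by
  have hn : (pvSeg cs m h).length = h - m := pvSegLen cs m h hle
  have hn1 : 1 ≤ h - m := by omega
  simp only [PySem.List.slice, PySem.List.clampIdx, hn]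
  norm_num
  rw [if_neg (by omega : ¬ h - m = 0),
      show ((h - m : Nat) : Int) + -1 = ((h - m - 1 : Nat) : Int) by omega,
      Int.toNat_natCast, show min 1 (h - m) = 1 by omega]
  simp only [pvSeg, List.drop_take, List.drop_drop, List.take_take]
  congr 1
  omega

theorem pvPeel2 (cs : List Char) (m h : Nat) (h2 : 2 ≤ h - m) (hle : h ≤ cs.length) :
    PySem.List.slice (pvSeg cs m h) (some 2) (some (-2)) = pvSeg cs (m + 2) (h - 2) := by
  have hn : (pvSeg cs m h).length = h - m := pvSegLen cs m h hle
  simp only [PySem.List.slice, PySem.List.clampIdx, hn]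
  norm_num
  rw [if_neg (by omega : ¬ h ≤ 1 + m),
      show ((h - m : Nat) : Int) + -2 = ((h - m - 2 : Nat) : Int) by omega,
      Int.toNat_natCast, show Int.toNat 2 = 2 from rfl, show min 2 (h - m) = 2 by omega]
  simp only [pvSeg, List.drop_take, List.drop_drop, List.take_take]
  congr 1
  omega

theorem main_lemma (cs : List Char) : ∀ (k lo hi : Nat), hi - lo ≤ k → hi ≤ cs.length →
    loopB cs lo hi = String.ofList (nimLoopA (PySem.Chars.strip ((cs.drop lo).take (hi - lo)))) := by
  intro k
  induction k using Nat.strong_induction_on with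
  | _ k ih =>
  intro lo hi hk hle
  have hmlo : lo ≤ skipL cs lo hi := skipL_ge cs lo hi
  have hhhi : skipR cs (skipL cs lo hi) hi ≤ hi := skipR_le cs (skipL cs lo hi) hi
  have hstrip : PySem.Chars.strip ((cs.drop lo).take (hi - lo))
      = pvSeg cs (skipL cs lo hi) (skipR cs (skipL cs lo hi) hi) := pvStripSeg cs lo hi hle
  rw [hstrip, loopB]
  dsimp only
  set m := skipL cs lo hi with hm
  set h := skipR cs m hi with hh
  have hle' : h ≤ cs.length := le_trans hhhi hle
  by_cases hmh : h ≤ m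
  · rw [if_pos hmh]
    have hseg : pvSeg cs m h = [] := by simp [pvSeg]; omega
    rw [hseg, nimLoopA]
    simp
  · rw [not_le] at hmh
    have hlen : (pvSeg cs m h).length = h - m := pvSegLen cs m h hle'
    have hneq : pvSeg cs m h ≠ [] := by
      intro e; rw [e] at hlen; simp at hlen; omega
    have hnotEmpty : ¬ ((pvSeg cs m h).isEmpty = true) := by
      simp only [List.isEmpty_iff]; exact hneq
    have g0 : (pvSeg cs m h)[0]? = some (cs.getD m ' ') := by
      have := pvSegGet cs m h 0 hle' (by omega); simpa using this
    have gl : (pvSeg cs m h)[(h - m) - 1]? = some (cs.getD (h - 1) ' ') := by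
      have := pvSegGet cs m h (h - m - 1) hle' (by omega)
      rwa [show m + (h - m - 1) = h - 1 by omega] at this
    rw [if_neg (by omega : ¬ h ≤ m)]
    by_cases hB1 : cs.getD m ' ' = cs.getD (h - 1) ' ' ∧ cs.getD m ' ' = '`'
    · rw [if_pos hB1, nimLoopA, if_neg hnotEmpty]
      have hA1 : ¬ (PySem.Chars.startswith (pvSeg cs m h) ['*','*']
          && PySem.Chars.endswith (pvSeg cs m h) ['*','*']) = true := by
        simp only [Bool.and_eq_true]
        rintro ⟨hs, _⟩
        rw [pvSW2] at hs
        have h1 := hs.1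
        rw [g0, hB1.2] at h1
        exact absurd h1 (by decide)
      have hA2 : ¬ (PySem.Chars.startswith (pvSeg cs m h) ['_','_']
          && PySem.Chars.endswith (pvSeg cs m h) ['_','_']) = true := by
        simp only [Bool.and_eq_true]
        rintro ⟨hs, _⟩
        rw [pvSW2] at hs
        have h1 := hs.1
        rw [g0, hB1.2] at h1
        exact absurd h1 (by decide)
      have hA3 : (PySem.Chars.startswith (pvSeg cs m h) ['`']
          && PySem.Chars.endswith (pvSeg cs m h) ['`']) = true := by
        rw [Bool.and_eq_true, pvSW1, pvEW1, hlen, g0, gl, hB1.2, ← hB1.1, hB1.2]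
        exact ⟨rfl, rfl⟩
      rw [if_neg hA1, if_neg hA2, if_pos hA3, pvPeel1 cs m h hmh hle']
      exact ih ((h - 1) - (m + 1)) (by omega) (m + 1) (h - 1) le_rfl (by omega)
    · by_cases hB2 : cs.getD m ' ' = cs.getD (h - 1) ' '
          ∧ (cs.getD m ' ' = '*' ∨ cs.getD m ' ' = '_') ∧ 2 ≤ h - m
          ∧ cs.getD (m + 1) ' ' = cs.getD m ' ' ∧ cs.getD (h - 2) ' ' = cs.getD m ' ' 
      · rw [if_neg hB1, if_pos hB2, nimLoopA, if_neg hnotEmpty]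
        obtain ⟨hce, hstar, h2, hc1, hc2⟩ := hB2
        have h2' : 2 ≤ (pvSeg cs m h).length := by rw [hlen]; exact h2
        have g1 : (pvSeg cs m h)[1]? = some (cs.getD (m + 1) ' ') :=
          pvSegGet cs m h 1 hle' (by omega)
        have gl2 : (pvSeg cs m h)[(h - m) - 2]? = some (cs.getD (h - 2) ' ') := by
          have := pvSegGet cs m h (h - m - 2) hle' (by omega)
          rwa [show m + (h - m - 2) = h - 2 by omega] at this
        rcases hstar with hstar | hstar
        · have hA1 : (PySem.Chars.startswith (pvSeg cs m h) ['*','*']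
              && PySem.Chars.endswith (pvSeg cs m h) ['*','*']) = true := by
            rw [Bool.and_eq_true, pvSW2, pvEW2 _ _ h2', hlen, g0, g1, gl, gl2,
                hstar, hc1, hstar, hc2, hstar, ← hce, hstar]
            exact ⟨⟨rfl, rfl⟩, rfl, rfl⟩
          rw [if_pos hA1, pvPeel2 cs m h h2 hle']
          exact ih ((h - 2) - (m + 2)) (by omega) (m + 2) (h - 2) le_rfl (by omega)
        · have hA1 : ¬ (PySem.Chars.startswith (pvSeg cs m h) ['*','*']
              && PySem.Chars.endswith (pvSeg cs m h) ['*','*']) = true := by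
            simp only [Bool.and_eq_true]
            rintro ⟨hs, _⟩
            rw [pvSW2] at hs
            have h1 := hs.1
            rw [g0, hstar] at h1
            exact absurd h1 (by decide)
          have hA2 : (PySem.Chars.startswith (pvSeg cs m h) ['_','_']
              && PySem.Chars.endswith (pvSeg cs m h) ['_','_']) = true := by
            rw [Bool.and_eq_true, pvSW2, pvEW2 _ _ h2', hlen, g0, g1, gl, gl2,
                hstar, hc1, hstar, hc2, hstar, ← hce, hstar]
            exact ⟨⟨rfl, rfl⟩, rfl, rfl⟩
          rw [if_neg hA1, if_pos hA2, pvPeel2 cs m h h2 hle']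
          exact ih ((h - 2) - (m + 2)) (by omega) (m + 2) (h - 2) le_rfl (by omega)
      · rw [if_neg hB1, if_neg hB2, nimLoopA, if_neg hnotEmpty]
        have hA3 : ¬ (PySem.Chars.startswith (pvSeg cs m h) ['`']
            && PySem.Chars.endswith (pvSeg cs m h) ['`']) = true := by
          rw [Bool.and_eq_true, pvSW1, pvEW1, hlen, g0, gl]
          rintro ⟨h1, h2⟩
          exact hB1 ⟨by rw [Option.some.injEq] at h1 h2; rw [h1, h2],
                     by rw [Option.some.injEq] at h1; exact h1⟩
        have hApair : ∀ w : Char, (PySem.Chars.startswith (pvSeg cs m h) [w, w]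
            && PySem.Chars.endswith (pvSeg cs m h) [w, w]) = true →
            cs.getD m ' ' = w ∧ cs.getD (m + 1) ' ' = w ∧ 2 ≤ h - m
              ∧ cs.getD (h - 2) ' ' = w ∧ cs.getD (h - 1) ' ' = w := by
          intro w hw
          rw [Bool.and_eq_true, pvSW2] at hw
          have h1lt : 1 < (pvSeg cs m h).length := by
            have := List.getElem?_eq_some_iff.mp hw.1.2
            exact this.1
          have h2 : 2 ≤ h - m := by omega
          have g1 : (pvSeg cs m h)[1]? = some (cs.getD (m + 1) ' ') :=
            pvSegGet cs m h 1 hle' (by omega)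
          have gl2 : (pvSeg cs m h)[(h - m) - 2]? = some (cs.getD (h - 2) ' ') := by
            have := pvSegGet cs m h (h - m - 2) hle' (by omega)
            rwa [show m + (h - m - 2) = h - 2 by omega] at this
          rw [pvEW2 _ _ (by omega), hlen, g0, g1, gl, gl2] at hw
          obtain ⟨⟨e0, e1⟩, e2, e3⟩ := hw
          rw [Option.some.injEq] at e0 e1 e2 e3
          exact ⟨e0, e1, h2, e2, e3⟩
        have hA1 : ¬ (PySem.Chars.startswith (pvSeg cs m h) ['*','*']
            && PySem.Chars.endswith (pvSeg cs m h) ['*','*']) = true := by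
          intro hw
          obtain ⟨e0, e1, h2, e2, e3⟩ := hApair '*' hw
          exact hB2 ⟨by rw [e0, e3], Or.inl e0, h2, by rw [e1, e0], by rw [e2, e0]⟩
        have hA2 : ¬ (PySem.Chars.startswith (pvSeg cs m h) ['_','_']
            && PySem.Chars.endswith (pvSeg cs m h) ['_','_']) = true := by
          intro hw
          obtain ⟨e0, e1, h2, e2, e3⟩ := hApair '_' hw
          exact hB2 ⟨by rw [e0, e3], Or.inr e0, h2, by rw [e1, e0], by rw [e2, e0]⟩
        rw [if_neg hA1, if_neg hA2, if_neg hA3]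
        rfl

-- ===== VERDICT (by name: the statement is the Claim_ definition above) =====
theorem normalize_inline_markdown_spec : Claim_equal_normalize_inline_markdown := by
  intro value _
  unfold Spec_normalize_inline_markdown normalize_inline_markdown normalize_inline_markdown_alt
  rw [main_lemma value.toList value.toList.length 0 value.toList.length (by omega) (le_refl _)]
  simp only [List.drop_zero, Nat.sub_zero, List.take_length]
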